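-- pv_equiv track=rewrite | github.com/alexm711/project_euler | 074.py | find_nr_chain_length
-- ===== SOURCE A (Python) =====
-- f = [1,1,2,6,24,120,720,5040,40320,362880]
--
-- def fact_dig(num):
-- 	return sum(f[int(i)] for i in str(num))
--
-- def find_nr_chain_length(n,num_leading_zeros=0):
-- 	keys = set()
-- 	total = 0
-- 	new_key = n
-- 	while new_key not in keys:
-- 		keys.add(new_key)
-- 		new_key = fact_dig(new_key)+num_leading_zeros
-- 		total+=1
-- 	return total
-- ===== SOURCE B (Python) =====
-- f = [1, 1, 2, 6, 24, 120, 720, 5040, 40320, 362880]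
--
--
-- def find_nr_chain_length(n, num_leading_zeros=0):
--     # Floyd's tortoise-and-hare cycle detection over the chain step function:
--     # the chain length until the first repeat equals mu + lam (tail + cycle).
--     def step(x):
--         return sum(f[int(d)] for d in str(x)) + num_leading_zeros
--
--     slow, fast = step(n), step(step(n))
--     while slow != fast:
--         slow = step(slow)
--         fast = step(step(fast))
--     mu = 0
--     slow = n
--     while slow != fast:
--         slow = step(slow)
--         fast = step(fast)
--         mu += 1
--     lam = 1
--     fast = step(slow)
--     while slow != fast:
--         fast = step(fast)
--         lam += 1
--     return mu + lam
-- ===== Notes on version B (the rewrite author's own statement) =====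
-- stated objective: alternative
-- what changed: Replaced the visited-set accumulation loop with Floyd's tortoise-and-hare cycle detection: find the meeting point, then the tail length mu and cycle length lam, and return mu + lam, which equals the number of distinct chain values A counts; O(1) memory instead of a growing set.
-- outside the precondition, e.g. on find_nr_chain_length(5, -2): A returns 42, B returns 42; on find_nr_chain_length(-5, 0): A raises ValueError, B raises ValueError
import Mathlib
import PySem

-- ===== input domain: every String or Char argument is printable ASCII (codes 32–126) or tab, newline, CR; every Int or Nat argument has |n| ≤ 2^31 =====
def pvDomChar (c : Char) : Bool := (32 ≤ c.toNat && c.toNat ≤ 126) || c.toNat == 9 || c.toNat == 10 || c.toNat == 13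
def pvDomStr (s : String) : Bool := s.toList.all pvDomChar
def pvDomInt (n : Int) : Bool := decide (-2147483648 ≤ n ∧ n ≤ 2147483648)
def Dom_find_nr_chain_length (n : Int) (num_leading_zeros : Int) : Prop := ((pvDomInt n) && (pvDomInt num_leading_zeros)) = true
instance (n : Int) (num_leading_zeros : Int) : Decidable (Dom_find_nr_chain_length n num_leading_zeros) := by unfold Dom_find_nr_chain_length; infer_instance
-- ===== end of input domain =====

-- B replaces A's visited-set loop by Floyd's tortoise-and-hare cycle detection (returns mu + lam);
-- same results, O(1) memory instead of a growing set (objective: alternative algorithm).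

-- ===== PORT A =====
-- f = [1,1,2,6,24,120,720,5040,40320,362880]
def pvFactList : List Int := [1, 1, 2, 6, 24, 120, 720, 5040, 40320, 362880]

-- fact_dig(num) = sum(f[int(i)] for i in str(num)); the '.getD' defaults only make the
-- function total — inside Pre_ every chain value is a nonnegative int, so every int(i)
-- succeeds and every list index is in range, exactly as in Python.
def fact_dig (num : Int) : Int :=
  ((PySem.Int.toChars num).map
    (fun c => PySem.List.pyGetD pvFactList ((PySem.Int.ofChars? [c]).getD 0) 0)).sum

-- fuel: a bound on the number of loop iterations, sufficient for every input in
-- Dom (proved below: the chain repeats after at most 2*M+2 < pvFuel steps).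
def pvFuel : Nat := 4310208260

-- the while-loop of A: while new_key not in keys: keys.add(new_key); new_key = fact_dig(new_key)+nlz; total += 1
def goA (nlz : Int) : Nat → PySem.Set Int → Int → Int → Int
  | 0, _, total, _ => total
  | fuel + 1, keys, total, new_key =>
    if PySem.Set.contains keys new_key then total
    else goA nlz fuel (PySem.Set.add keys new_key) (total + 1) (fact_dig new_key + nlz)

def find_nr_chain_length (n : Int) (num_leading_zeros : Int) : Int :=
  goA num_leading_zeros pvFuel PySem.Set.empty 0 n

-- ===== PORT B =====
-- B's local step(x) = sum(f[int(d)] for d in str(x)) + num_leading_zeros; the digit sum is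
-- the same helper expression as in A, shared here as fact_dig.
-- phase 1: while slow != fast: slow = step(slow); fast = step(step(fast))
def goMeet (nlz : Int) : Nat → Int → Int → Int × Int
  | 0, slow, fast => (slow, fast)
  | fuel + 1, slow, fast =>
    if slow = fast then (slow, fast)
    else goMeet nlz fuel (fact_dig slow + nlz) (fact_dig (fact_dig fast + nlz) + nlz)

-- phase 2: while slow != fast: slow = step(slow); fast = step(fast); mu += 1
def goMu (nlz : Int) : Nat → Int → Int → Int → Int × Int
  | 0, slow, _, mu => (slow, mu)
  | fuel + 1, slow, fast, mu =>
    if slow = fast then (slow, mu)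
    else goMu nlz fuel (fact_dig slow + nlz) (fact_dig fast + nlz) (mu + 1)

-- phase 3: while slow != fast: fast = step(fast); lam += 1
def goLam (nlz : Int) : Nat → Int → Int → Int → Int
  | 0, _, _, lam => lam
  | fuel + 1, slow, fast, lam =>
    if slow = fast then lam
    else goLam nlz fuel slow (fact_dig fast + nlz) (lam + 1)

def find_nr_chain_length_alt (n : Int) (num_leading_zeros : Int) : Int :=
  let s1 := fact_dig n + num_leading_zeros
  let meet := goMeet num_leading_zeros pvFuel s1 (fact_dig s1 + num_leading_zeros)
  let m2 := goMu num_leading_zeros pvFuel n meet.2 0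
  let lam := goLam num_leading_zeros pvFuel m2.1 (fact_dig m2.1 + num_leading_zeros) 1
  m2.2 + lam

-- ===== PRECONDITION & SPEC =====
-- Pre_ excludes negative n, where str(n) starts with '-' and A's int(i) raises ValueError at once,
-- and num_leading_zeros ≤ -2, where whether A raises that same ValueError depends on whether the
-- chain ever reaches a negative value — a property of the whole iteration, with no closed-form
-- input characterisation; on the excluded inputs whose chain happens to stay nonnegative A
-- returns and B returns the identical value (see the cited example).  With n ≥ 0 and
-- num_leading_zeros ≥ -1 every step value fact_dig(x)+nlz ≥ 1+nlz ≥ 0, so A never raises.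
def Pre_find_nr_chain_length (n : Int) (num_leading_zeros : Int) : Prop :=
  0 ≤ n ∧ -1 ≤ num_leading_zeros
instance (n : Int) (num_leading_zeros : Int) : Decidable (Pre_find_nr_chain_length n num_leading_zeros) := by
  unfold Pre_find_nr_chain_length; infer_instance

def pvWitness_find_nr_chain_length : Int × Int := (5, 0)

def Spec_find_nr_chain_length (n : Int) (num_leading_zeros : Int) (out : Int) : Prop :=
  out = find_nr_chain_length_alt n num_leading_zeros
instance (n : Int) (num_leading_zeros : Int) (out : Int) : Decidable (Spec_find_nr_chain_length n num_leading_zeros out) := by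
  unfold Spec_find_nr_chain_length; infer_instance

-- ===== CLAIM (what is proved, stated in full; the proofs are below) =====
def Claim_equal_find_nr_chain_length : Prop := ∀ (n : Int) (num_leading_zeros : Int), Dom_find_nr_chain_length n num_leading_zeros → Pre_find_nr_chain_length n num_leading_zeros → Spec_find_nr_chain_length n num_leading_zeros (find_nr_chain_length n num_leading_zeros)

-- ===== LEMMAS AND PROOFS =====

-- the chain value bound: every chain value after the first step lies in [-M, M]
def pvM : Int := 2155104128

-- each digit-factorial term lies in [0, 362880]
lemma pv_term_bound (d : Int) :
    0 ≤ PySem.List.pyGetD pvFactList d 0 ∧ PySem.List.pyGetD pvFactList d 0 ≤ 362880 := by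
  unfold PySem.List.pyGetD
  cases h : PySem.List.pyGet? pvFactList d with
  | none => simp
  | some v =>
    have hv : v ∈ pvFactList := PySem.List.mem_of_pyGet?_eq_some _ h
    simp only [Option.getD_some]
    simp only [pvFactList, List.mem_cons, List.not_mem_nil, or_false] at hv
    rcases hv with h | h | h | h | h | h | h | h | h | h <;> omega

lemma pv_sum_bound (l : List Int) (h : ∀ y ∈ l, 0 ≤ y ∧ y ≤ 362880) :
    0 ≤ l.sum ∧ l.sum ≤ 362880 * (l.length : Int) := by
  induction l with
  | nil => simp
  | cons x xs ih =>
    have hx := h x (by simp)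
    have hxs := ih (fun y hy => h y (by simp [hy]))
    simp only [List.sum_cons, List.length_cons]
    push_cast
    constructor <;> nlinarith [hx.1, hx.2, hxs.1, hxs.2]

lemma pv_toChars_len (x : Int) (hx : x.natAbs ≤ 10 ^ 19) :
    (PySem.Int.toChars x).length ≤ 21 := by
  have hlt : x.natAbs < 10 ^ 20 := by
    calc x.natAbs ≤ 10 ^ 19 := hx
    _ < 10 ^ 20 := by norm_num
  have hdig : (Nat.toDigits 10 x.natAbs).length ≤ 20 :=
    Nat.toDigits_length 10 x.natAbs 20 (by norm_num) hlt
  unfold PySem.Int.toChars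
  by_cases hneg : x < 0
  · have : x.toNat = 0 := by omega
    simp only [hneg, if_pos, List.length_cons]
    omega
  · have hx0 : x.toNat = x.natAbs := by omega
    simp only [hneg, if_false, hx0]
    omega

lemma pv_fact_dig_bound (x : Int) (hx : x.natAbs ≤ 10 ^ 19) :
    0 ≤ fact_dig x ∧ fact_dig x ≤ 7620480 := by
  have hlen := pv_toChars_len x hx
  have hb := pv_sum_bound ((PySem.Int.toChars x).map
      (fun c => PySem.List.pyGetD pvFactList ((PySem.Int.ofChars? [c]).getD 0) 0))
    (by
      intro y hy
      simp only [List.mem_map] at hy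
      obtain ⟨c, _, rfl⟩ := hy
      exact pv_term_bound _)
  rw [List.length_map] at hb
  unfold fact_dig
  constructor
  · exact hb.1
  · calc _ ≤ 362880 * ((PySem.Int.toChars x).length : Int) := hb.2
    _ ≤ 362880 * 21 := by
        have : ((PySem.Int.toChars x).length : Int) ≤ 21 := by exact_mod_cast hlen
        nlinarith
    _ = 7620480 := by norm_num

lemma pv_step_bound (nlz x : Int) (hz : nlz.natAbs ≤ 2 ^ 31) (hx : x.natAbs ≤ pvM) :
    (fact_dig x + nlz).natAbs ≤ pvM := by
  have hx19 : x.natAbs ≤ 10 ^ 19 := by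
    have : pvM ≤ 10 ^ 19 := by unfold pvM; norm_num
    unfold pvM at hx; omega
  have hf := pv_fact_dig_bound x hx19
  unfold pvM at *
  omega


-- ===== eventually-periodic-orbit machinery =====

lemma pv_shift (g : Int → Int) (x0 : Int) {i j : Nat} (k : Nat)
    (h : g^[i] x0 = g^[j] x0) : g^[i + k] x0 = g^[j + k] x0 := by
  rw [add_comm i k, add_comm j k, Function.iterate_add_apply, Function.iterate_add_apply, h]

lemma pv_per (g : Int → Int) (x0 : Int) (mu lam : Nat)
    (hp : g^[mu + lam] x0 = g^[mu] x0) :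
    ∀ (k e : Nat), g^[mu + e + k * lam] x0 = g^[mu + e] x0 := by
  intro k
  induction k with
  | zero => simp
  | succ k ih =>
    intro e
    have h1 : g^[mu + lam + (e + k * lam)] x0 = g^[mu + (e + k * lam)] x0 :=
      pv_shift g x0 _ hp
    have e1 : mu + e + (k + 1) * lam = mu + lam + (e + k * lam) := by ring
    have e2 : mu + (e + k * lam) = mu + e + k * lam := by ring
    rw [e1, h1, e2, ih e]

lemma pv_inj (g : Int → Int) (x0 : Int) (mu lam : Nat)
    (hp : g^[mu + lam] x0 = g^[mu] x0)
    (hlmin : ∀ d, 0 < d → d < lam → g^[mu + d] x0 ≠ g^[mu] x0) :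
    ∀ u v, mu ≤ u → u < v → v < mu + lam → g^[u] x0 ≠ g^[v] x0 := by
  intro u v hu huv hv heq
  have h1 : g^[u + (mu + lam - v)] x0 = g^[v + (mu + lam - v)] x0 :=
    pv_shift g x0 _ heq
  have hv' : v + (mu + lam - v) = mu + lam := by omega
  have hu' : u + (mu + lam - v) = mu + (lam - (v - u)) := by omega
  rw [hv', hp, hu'] at h1
  exact hlmin _ (by omega) (by omega) h1

lemma pv_char (g : Int → Int) (x0 : Int) (mu lam : Nat)
    (hp : g^[mu + lam] x0 = g^[mu] x0) (hl : 0 < lam)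
    (hmumin : ∀ a b : Nat, a < b → g^[a] x0 = g^[b] x0 → mu ≤ a)
    (hlmin : ∀ d, 0 < d → d < lam → g^[mu + d] x0 ≠ g^[mu] x0) :
    ∀ a b : Nat, a < b → g^[a] x0 = g^[b] x0 → mu ≤ a ∧ lam ∣ (b - a) := by
  intro a b hab heq
  have ha : mu ≤ a := hmumin a b hab heq
  have hb : mu ≤ b := by omega
  have hqa := Nat.div_add_mod (a - mu) lam
  have hqb := Nat.div_add_mod (b - mu) lam
  have hra : g^[a] x0 = g^[mu + (a - mu) % lam] x0 := by
    have h := pv_per g x0 mu lam hp ((a - mu) / lam) ((a - mu) % lam)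
    have hc : ((a - mu) / lam) * lam = lam * ((a - mu) / lam) := mul_comm _ _
    have e : mu + (a - mu) % lam + ((a - mu) / lam) * lam = a := by omega
    rw [e] at h
    exact h
  have hrb : g^[b] x0 = g^[mu + (b - mu) % lam] x0 := by
    have h := pv_per g x0 mu lam hp ((b - mu) / lam) ((b - mu) % lam)
    have hc : ((b - mu) / lam) * lam = lam * ((b - mu) / lam) := mul_comm _ _
    have e : mu + (b - mu) % lam + ((b - mu) / lam) * lam = b := by omega
    rw [e] at h
    exact h
  have hres : g^[mu + (a - mu) % lam] x0 = g^[mu + (b - mu) % lam] x0 := by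
    rw [← hra, ← hrb, heq]
  have hma : (a - mu) % lam < lam := Nat.mod_lt _ hl
  have hmb : (b - mu) % lam < lam := Nat.mod_lt _ hl
  have hreq : (a - mu) % lam = (b - mu) % lam := by
    rcases Nat.lt_trichotomy ((a - mu) % lam) ((b - mu) % lam) with h | h | h
    · exact absurd hres (pv_inj g x0 mu lam hp hlmin _ _ (by omega) (by omega) (by omega))
    · exact h
    · exact absurd hres.symm (pv_inj g x0 mu lam hp hlmin _ _ (by omega) (by omega) (by omega))
  refine ⟨ha, ⟨(b - mu) / lam - (a - mu) / lam, ?_⟩⟩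
  have hc1 : lam * ((a - mu) / lam) ≤ lam * ((b - mu) / lam) := by omega
  have hqle : (a - mu) / lam ≤ (b - mu) / lam := Nat.le_of_mul_le_mul_left hc1 hl
  have hmul : lam * ((b - mu) / lam - (a - mu) / lam)
      = lam * ((b - mu) / lam) - lam * ((a - mu) / lam) := Nat.mul_sub _ _ _
  omega

-- pigeonhole: the orbit stays in [-pvM, pvM], so some two of its first
-- 4310208258 values coincide
lemma pv_collision (n nlz : Int) (hn : n.natAbs ≤ 2 ^ 31) (hz : nlz.natAbs ≤ 2 ^ 31) :
    ∃ a b : Nat, a < b ∧ b ≤ 4310208257 ∧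
      (fun x => fact_dig x + nlz)^[a] n = (fun x => fact_dig x + nlz)^[b] n := by
  have hb : ∀ i : Nat, ((fun x => fact_dig x + nlz)^[i] n).natAbs ≤ pvM := by
    intro i
    induction i with
    | zero =>
      simp only [Function.iterate_zero, id_eq]
      unfold pvM; omega
    | succ i ih =>
      rw [Function.iterate_succ_apply']
      exact pv_step_bound nlz _ hz ih
  have hcard : (Finset.Icc (-pvM) pvM).card = 4310208257 := by
    rw [Int.card_Icc]
    norm_num [pvM]
    rfl
  obtain ⟨x, hx, y, hy, hxy, hfeq⟩ :=
    Finset.exists_ne_map_eq_of_card_lt_of_maps_to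
      (s := Finset.range 4310208258) (t := Finset.Icc (-pvM) pvM)
      (by rw [hcard, Finset.card_range]; omega)
      (f := fun i => (fun x => fact_dig x + nlz)^[i] n)
      (by
        intro i _
        simp only [Finset.coe_Icc, Set.mem_Icc]
        have := hb i
        omega)
  simp only [Finset.mem_range] at hx hy
  rcases Nat.lt_or_ge x y with h | h
  · exact ⟨x, y, h, by omega, hfeq⟩
  · exact ⟨y, x, by omega, by omega, hfeq.symm⟩


-- the chain sequence
def pvS (nlz n : Int) (i : Nat) : Int := (fun x => fact_dig x + nlz)^[i] n

lemma pv_s_zero (nlz n : Int) : pvS nlz n 0 = n := rfl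

lemma pv_s_succ (nlz n : Int) (k : Nat) :
    pvS nlz n (k + 1) = fact_dig (pvS nlz n k) + nlz := by
  unfold pvS
  rw [Function.iterate_succ_apply']

lemma pv_loopA (nlz n : Int) (t : Nat)
    (hrep : ∃ a, a < t ∧ pvS nlz n a = pvS nlz n t)
    (hmin : ∀ k, k < t → ¬∃ a, a < k ∧ pvS nlz n a = pvS nlz n k) :
    ∀ (fuel k : Nat) (keys : PySem.Set Int),
      (∀ y : Int, y ∈ keys ↔ ∃ i, i < k ∧ pvS nlz n i = y) →
      k ≤ t → t < k + fuel →
      goA nlz fuel keys (k : Int) (pvS nlz n k) = (t : Int) := by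
  intro fuel
  induction fuel with
  | zero => intro k keys hkeys hkt hf; omega
  | succ fuel ih =>
    intro k keys hkeys hkt hf
    by_cases hk : k = t
    · subst hk
      have hmem : pvS nlz n k ∈ keys := (hkeys _).2 hrep
      have hc : PySem.Set.contains keys (pvS nlz n k) = true := by
        simpa [PySem.Set.contains] using hmem
      simp only [goA]
      rw [if_pos hc]
    · have hklt : k < t := by omega
      have hnmem : pvS nlz n k ∉ keys := fun hm => hmin k hklt ((hkeys _).1 hm)
      have hc : PySem.Set.contains keys (pvS nlz n k) = false := by
        simpa [PySem.Set.contains] using hnmem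
      simp only [goA]
      rw [if_neg (by simpa [PySem.Set.contains] using hnmem)]
      rw [← pv_s_succ nlz n k]
      have hcast : (k : Int) + 1 = ((k + 1 : Nat) : Int) := by push_cast; ring
      rw [hcast]
      apply ih (k + 1) _ _ (by omega) (by omega)
      intro y
      rw [PySem.Set.mem_add]
      constructor
      · rintro (hy | rfl)
        · obtain ⟨i, hi, he⟩ := (hkeys y).1 hy
          exact ⟨i, by omega, he⟩
        · exact ⟨k, by omega, rfl⟩
      · rintro ⟨i, hi, he⟩
        by_cases hik : i = k
        · subst hik; exact Or.inr he.symm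
        · exact Or.inl ((hkeys y).2 ⟨i, by omega, he⟩)

lemma pv_loopMeet (nlz n : Int) (mstar : Nat)
    (heq : pvS nlz n mstar = pvS nlz n (2 * mstar))
    (hmin : ∀ m, 0 < m → m < mstar → pvS nlz n m ≠ pvS nlz n (2 * m)) :
    ∀ (fuel k : Nat), 0 < k → k ≤ mstar → mstar < k + fuel →
      goMeet nlz fuel (pvS nlz n k) (pvS nlz n (2 * k))
        = (pvS nlz n mstar, pvS nlz n (2 * mstar)) := by
  intro fuel
  induction fuel with
  | zero => intro k hk0 hk hf; omega
  | succ fuel ih =>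
    intro k hk0 hk hf
    by_cases hkm : k = mstar
    · subst hkm
      simp [goMeet, heq]
    · have hne : pvS nlz n k ≠ pvS nlz n (2 * k) := hmin k hk0 (by omega)
      simp only [goMeet, hne, if_false]
      have h1 : fact_dig (pvS nlz n k) + nlz = pvS nlz n (k + 1) := (pv_s_succ nlz n k).symm
      have h2 : fact_dig (fact_dig (pvS nlz n (2 * k)) + nlz) + nlz
          = pvS nlz n (2 * (k + 1)) := by
        rw [← pv_s_succ nlz n (2 * k), ← pv_s_succ nlz n (2 * k + 1)]
        ring_nf
      rw [h1, h2]
      exact ih (k + 1) (by omega) (by omega) (by omega)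

lemma pv_loopMu (nlz n : Int) (mstar mu : Nat)
    (heq : pvS nlz n mu = pvS nlz n (mstar + mu))
    (hlt : ∀ i, i < mu → pvS nlz n i ≠ pvS nlz n (mstar + i)) :
    ∀ (fuel k : Nat), k ≤ mu → mu < k + fuel →
      goMu nlz fuel (pvS nlz n k) (pvS nlz n (mstar + k)) (k : Int)
        = (pvS nlz n mu, (mu : Int)) := by
  intro fuel
  induction fuel with
  | zero => intro k hk hf; omega
  | succ fuel ih =>
    intro k hk hf
    by_cases hkm : k = mu
    · subst hkm
      simp [goMu, heq]
    · have hne : pvS nlz n k ≠ pvS nlz n (mstar + k) := hlt k (by omega)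
      simp only [goMu, hne, if_false]
      rw [← pv_s_succ nlz n k, ← pv_s_succ nlz n (mstar + k)]
      have e : mstar + k + 1 = mstar + (k + 1) := by omega
      rw [e]
      have hcast : (k : Int) + 1 = ((k + 1 : Nat) : Int) := by push_cast; ring
      rw [hcast]
      exact ih (k + 1) (by omega) (by omega)

lemma pv_loopLam (nlz n : Int) (mu lam : Nat)
    (heq : pvS nlz n (mu + lam) = pvS nlz n mu)
    (hmin : ∀ j, 0 < j → j < lam → pvS nlz n (mu + j) ≠ pvS nlz n mu) :
    ∀ (fuel j : Nat), 0 < j → j ≤ lam → lam < j + fuel →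
      goLam nlz fuel (pvS nlz n mu) (pvS nlz n (mu + j)) (j : Int) = (lam : Int) := by
  intro fuel
  induction fuel with
  | zero => intro j hj0 hj hf; omega
  | succ fuel ih =>
    intro j hj0 hj hf
    by_cases hjl : j = lam
    · subst hjl
      simp [goLam, heq.symm]
    · have hne : pvS nlz n mu ≠ pvS nlz n (mu + j) :=
        fun h => hmin j hj0 (by omega) h.symm
      simp only [goLam, hne, if_false]
      rw [← pv_s_succ nlz n (mu + j)]
      have e : mu + j + 1 = mu + (j + 1) := by omega
      rw [e]
      have hcast : (j : Int) + 1 = ((j + 1 : Nat) : Int) := by push_cast; ring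
      rw [hcast]
      exact ih (j + 1) (by omega) (by omega) (by omega)

lemma pv_m0 (nlz n : Int) (mu lam : Nat) (hlam_pos : 0 < lam)
    (hlam_eq : pvS nlz n (mu + lam) = pvS nlz n mu) :
    0 < lam * (mu / lam + 1) ∧
      pvS nlz n (lam * (mu / lam + 1)) = pvS nlz n (2 * (lam * (mu / lam + 1))) ∧
      lam * (mu / lam + 1) ≤ mu + lam := by
  have hdm := Nat.div_add_mod mu lam
  have hml : mu % lam < lam := Nat.mod_lt _ hlam_pos
  have hmulsucc : lam * (mu / lam + 1) = lam * (mu / lam) + lam := by ring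
  refine ⟨by omega, ?_, by omega⟩
  have h := pv_per (fun x => fact_dig x + nlz) n mu lam hlam_eq (mu / lam + 1)
    (lam * (mu / lam + 1) - mu)
  have hc : (mu / lam + 1) * lam = lam * (mu / lam + 1) := mul_comm _ _
  have e1 : mu + (lam * (mu / lam + 1) - mu) + (mu / lam + 1) * lam
      = 2 * (lam * (mu / lam + 1)) := by omega
  have e2 : mu + (lam * (mu / lam + 1) - mu) = lam * (mu / lam + 1) := by omega
  rw [e1, e2] at h
  exact h.symm

theorem find_nr_chain_length_spec : Claim_equal_find_nr_chain_length := by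
  intro n nlz hdom hpre
  unfold Spec_find_nr_chain_length
  unfold Dom_find_nr_chain_length pvDomInt at hdom
  simp only [Bool.and_eq_true, decide_eq_true_eq] at hdom
  have hn : n.natAbs ≤ 2 ^ 31 := by omega
  have hz : nlz.natAbs ≤ 2 ^ 31 := by omega
  classical
  obtain ⟨a0, b0, hab0, hb0, hcol0⟩ := pv_collision n nlz hn hz
  have hcol0' : pvS nlz n a0 = pvS nlz n b0 := hcol0
  have hPex : ∃ b : Nat, ∃ a, a < b ∧ pvS nlz n a = pvS nlz n b := ⟨b0, a0, hab0, hcol0'⟩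
  set t := Nat.find hPex with htdef
  have ht_rep : ∃ a, a < t ∧ pvS nlz n a = pvS nlz n t := Nat.find_spec hPex
  have ht_min : ∀ k, k < t → ¬∃ a, a < k ∧ pvS nlz n a = pvS nlz n k :=
    fun k hk => Nat.find_min hPex hk
  have ht_le : t ≤ b0 := Nat.find_min' hPex ⟨a0, hab0, hcol0'⟩
  have hQex : ∃ a : Nat, ∃ b, a < b ∧ pvS nlz n a = pvS nlz n b := ⟨a0, b0, hab0, hcol0'⟩
  set mu := Nat.find hQex with hmudef
  obtain ⟨bmu, hmub, hmueq⟩ : ∃ b, mu < b ∧ pvS nlz n mu = pvS nlz n b := Nat.find_spec hQex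
  have hmumin : ∀ a b : Nat, a < b → pvS nlz n a = pvS nlz n b → mu ≤ a :=
    fun a b hab heq => Nat.find_min' hQex ⟨b, hab, heq⟩
  have hRex : ∃ d : Nat, 0 < d ∧ pvS nlz n (mu + d) = pvS nlz n mu := by
    refine ⟨bmu - mu, by omega, ?_⟩
    have e : mu + (bmu - mu) = bmu := by omega
    rw [e]; exact hmueq.symm
  set lam := Nat.find hRex with hlamdef
  obtain ⟨hlam_pos, hlam_eq⟩ : 0 < lam ∧ pvS nlz n (mu + lam) = pvS nlz n mu :=
    Nat.find_spec hRex
  have hlam_min : ∀ d, 0 < d → d < lam → pvS nlz n (mu + d) ≠ pvS nlz n mu :=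
    fun d h1 h2 he => Nat.find_min hRex h2 ⟨h1, he⟩
  have hchar : ∀ a b : Nat, a < b → pvS nlz n a = pvS nlz n b → mu ≤ a ∧ lam ∣ (b - a) :=
    pv_char (fun x => fact_dig x + nlz) n mu lam hlam_eq hlam_pos hmumin hlam_min
  have ht1 : t ≤ mu + lam := Nat.find_min' hPex ⟨mu, by omega, hlam_eq.symm⟩
  have ht2 : mu + lam ≤ t := by
    obtain ⟨c, hct, hceq⟩ := ht_rep
    obtain ⟨hc1, hdvd⟩ := hchar c t hct hceq
    have hle : lam ≤ t - c := Nat.le_of_dvd (by omega) hdvd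
    omega
  have html : t = mu + lam := le_antisymm ht1 ht2
  have hfuel : (4310208260 : Nat) = pvFuel := rfl
  -- A's loop computes t
  have hA : find_nr_chain_length n nlz = (t : Int) := by
    unfold find_nr_chain_length
    have h := pv_loopA nlz n t ht_rep ht_min pvFuel 0 PySem.Set.empty
      (by
        intro y
        constructor
        · intro hy; exact absurd hy (by simp [PySem.Set.empty])
        · rintro ⟨i, hi, _⟩; omega)
      (by omega) (by omega)
    simpa [pv_s_zero] using h
  -- Floyd phase 1: the meeting point mstar
  have hm0 := pv_m0 nlz n mu lam hlam_pos hlam_eq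
  have hm0ex : ∃ m, 0 < m ∧ pvS nlz n m = pvS nlz n (2 * m) :=
    ⟨lam * (mu / lam + 1), hm0.1, hm0.2.1⟩
  set mstar := Nat.find hm0ex with hmsdef
  obtain ⟨hms_pos, hms_eq⟩ : 0 < mstar ∧ pvS nlz n mstar = pvS nlz n (2 * mstar) :=
    Nat.find_spec hm0ex
  have hms_min : ∀ m, 0 < m → m < mstar → pvS nlz n m ≠ pvS nlz n (2 * m) :=
    fun m h1 h2 he => Nat.find_min hm0ex h2 ⟨h1, he⟩
  have hms_le : mstar ≤ mu + lam :=
    le_trans (Nat.find_min' hm0ex ⟨hm0.1, hm0.2.1⟩) hm0.2.2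
  have hms_char : mu ≤ mstar ∧ lam ∣ mstar := by
    have h := hchar mstar (2 * mstar) (by omega) hms_eq
    have e : 2 * mstar - mstar = mstar := by omega
    rw [e] at h; exact h
  obtain ⟨hmums, qs, hqs⟩ := hms_char
  have hmeet := pv_loopMeet nlz n mstar hms_eq hms_min pvFuel 1 (by omega) (by omega)
    (by omega)
  -- Floyd phase 2 computes mu
  have hmu_eq : pvS nlz n mu = pvS nlz n (mstar + mu) := by
    have h := pv_per (fun x => fact_dig x + nlz) n mu lam hlam_eq qs 0
    have hc : qs * lam = lam * qs := mul_comm _ _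
    have e1 : mu + 0 + qs * lam = mstar + mu := by omega
    rw [e1] at h
    have e2 : mu + 0 = mu := rfl
    rw [e2] at h
    exact h.symm
  have hmu_lt : ∀ i, i < mu → pvS nlz n i ≠ pvS nlz n (mstar + i) := by
    intro i hi he
    have := (hchar i (mstar + i) (by omega) he).1
    omega
  have hmu := pv_loopMu nlz n mstar mu hmu_eq hmu_lt pvFuel 0 (by omega) (by omega)
  -- Floyd phase 3 computes lam
  have hlamloop := pv_loopLam nlz n mu lam hlam_eq hlam_min pvFuel 1 (by omega) (by omega)
    (by omega)
  -- assemble B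
  have hB : find_nr_chain_length_alt n nlz = ((mu : Int) + (lam : Int)) := by
    unfold find_nr_chain_length_alt
    have e1 : fact_dig n + nlz = pvS nlz n 1 := by rw [pv_s_succ, pv_s_zero]
    have e2 : fact_dig (pvS nlz n 1) + nlz = pvS nlz n (2 * 1) := by
      rw [← pv_s_succ nlz n 1]
    simp only [e1, e2, hmeet]
    rw [← hms_eq]
    rw [Nat.add_zero] at hmu
    have hmu' : goMu nlz pvFuel n (pvS nlz n mstar) (0 : Int) = (pvS nlz n mu, (mu : Int)) :=
      hmu
    simp only [hmu']
    have e4 : fact_dig (pvS nlz n mu) + nlz = pvS nlz n (mu + 1) := (pv_s_succ nlz n mu).symm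
    simp only [e4]
    have hlam' : goLam nlz pvFuel (pvS nlz n mu) (pvS nlz n (mu + 1)) (1 : Int) = (lam : Int) :=
      hlamloop
    rw [hlam']
  rw [hA, hB, html]
  push_cast
  ring
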